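-- pv_equiv track=rewrite | github.com/kevinggraphiste-hub/Gungnir | backend/core/agents/wolf_tools.py | _is_protected_path
-- ===== SOURCE A (Python) =====
-- PROTECTED_PATHS = {"backups", "data/backups", ".git"}
--
-- PROTECTED_PREFIXES = ("backups/", "data/backups/", ".git/")
--
-- def _is_protected_path(path: str) -> bool:
--     """Check if a path touches protected directories (backups, .git)."""
--     normalized = path.replace("\\", "/").strip("/")
--     if normalized in PROTECTED_PATHS:
--         return True
--     for prefix in PROTECTED_PREFIXES:
--         if normalized.startswith(prefix):
--             return True
--     return False
-- ===== SOURCE B (Python) =====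
-- PROTECTED_PATHS = {"backups", "data/backups", ".git"}
--
-- def _is_protected_path(path: str) -> bool:
--     """Check if a path touches protected directories (backups, .git)."""
--     normalized = path.replace("\\", "/").strip("/")
--     for i, ch in enumerate(normalized):
--         if ch == "/" and normalized[:i] in PROTECTED_PATHS:
--             return True
--     return normalized in PROTECTED_PATHS
-- ===== Notes on version B (the rewrite author's own statement) =====
-- stated objective: idiomatic
-- what changed: B drops the PROTECTED_PREFIXES tuple and its startswith loop; instead it scans the normalized path once and tests each ancestor prefix ending at a path separator (and finally the whole path) for membership in the single PROTECTED_PATHS set.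
import Mathlib
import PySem

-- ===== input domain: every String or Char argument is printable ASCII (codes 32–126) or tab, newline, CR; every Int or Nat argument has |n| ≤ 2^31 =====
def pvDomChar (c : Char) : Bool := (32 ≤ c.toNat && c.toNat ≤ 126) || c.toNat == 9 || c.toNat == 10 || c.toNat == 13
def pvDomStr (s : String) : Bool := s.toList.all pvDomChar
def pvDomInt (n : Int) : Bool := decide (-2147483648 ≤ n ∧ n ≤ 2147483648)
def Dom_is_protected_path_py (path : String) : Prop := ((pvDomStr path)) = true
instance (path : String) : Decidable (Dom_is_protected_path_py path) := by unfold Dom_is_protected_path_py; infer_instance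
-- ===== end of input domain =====

-- B replaces the separate exact-match set and prefix tuple by a single scan that
-- tests each ancestor prefix ending at a separator (and the whole path) against one set;
-- objective: idiomatic (same cost, one membership rule instead of two).


-- ===== PORT A =====
-- PROTECTED_PATHS = {"backups", "data/backups", ".git"}   (a set of string literals)
def pvProtectedPaths : List (List Char) :=
  ["backups".toList, "data/backups".toList, ".git".toList]

-- PROTECTED_PREFIXES = ("backups/", "data/backups/", ".git/")
def pvProtectedPrefixes : List (List Char) :=
  ["backups/".toList, "data/backups/".toList, ".git/".toList]

def is_protected_path_py (path : String) : Bool :=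
  let normalized := PySem.Chars.stripChars (PySem.Chars.replace path.toList ['\\'] ['/']) ['/']
  if pvProtectedPaths.contains normalized then true
  else pvProtectedPrefixes.any (fun p => PySem.Chars.startswith normalized p)

-- ===== PORT B =====
def is_protected_path_py_alt (path : String) : Bool :=
  let normalized := PySem.Chars.stripChars (PySem.Chars.replace path.toList ['\\'] ['/']) ['/']
  if (PySem.List.enumerate normalized).any
      (fun ic => ic.2 == '/' && pvProtectedPaths.contains (PySem.Chars.slice normalized none (some ic.1)))
  then true
  else pvProtectedPaths.contains normalized

-- ===== PRECONDITION & SPEC =====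
def Spec_is_protected_path_py (path : String) (out : Bool) : Prop := out = is_protected_path_py_alt path
instance (path : String) (out : Bool) : Decidable (Spec_is_protected_path_py path out) := by unfold Spec_is_protected_path_py; infer_instance

-- ===== CLAIM (what is proved, stated in full; the proofs are below) =====
def Claim_equal_is_protected_path_py : Prop := ∀ (path : String), Dom_is_protected_path_py path → Spec_is_protected_path_py path (is_protected_path_py path)

-- ===== LEMMAS AND PROOFS =====

-- r ++ "/" is a prefix of n  ↔  some index i holds '/' with n[:i] = r
theorem pv_prefix_slash_iff (r n : List Char) :
    (r ++ ['/']) <+: n ↔ ∃ i, ∃ h : i < n.length, n[i] = '/' ∧ n.take i = r := by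
  constructor
  · rintro ⟨t, rfl⟩
    refine ⟨r.length, by simp, ?_, ?_⟩
    · simp
    · rw [List.append_assoc, List.take_left]
  · rintro ⟨i, h, hc, rfl⟩
    have : n.take (i + 1) = n.take i ++ ['/'] := by
      rw [List.take_succ]
      simp [List.getElem?_eq_getElem h, hc]
    rw [← this]
    exact List.take_prefix _ _

-- the scan of B finds a hit  ↔  some protected prefix of A matches
theorem pv_scan_iff (n : List Char) :
    ((PySem.List.enumerate n).any
      (fun ic => ic.2 == '/' && pvProtectedPaths.contains (PySem.Chars.slice n none (some ic.1))) = true)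
    ↔ (pvProtectedPrefixes.any (fun p => PySem.Chars.startswith n p) = true) := by
  rw [List.any_eq_true, List.any_eq_true]
  constructor
  · rintro ⟨⟨i, c⟩, hmem, hpred⟩
    rw [PySem.List.mem_enumerate_iff] at hmem
    obtain ⟨k, hk, hpk⟩ := hmem
    obtain ⟨h1, h2⟩ := Prod.mk.injEq .. ▸ hpk
    simp only [h1, h2, zero_add] at hpred ⊢
    simp only [Bool.and_eq_true, beq_iff_eq] at hpred
    obtain ⟨hc, hmemP⟩ := hpred
    have hslice : PySem.Chars.slice n none (some (k : Int)) = n.take k := by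
      simpa using PySem.List.slice_to n k
    rw [hslice] at hmemP
    simp only [pvProtectedPaths, List.contains_eq_mem, decide_eq_true_eq, List.mem_cons, List.not_mem_nil, or_false] at hmemP
    have hpref : (n.take k ++ ['/']) <+: n :=
      (pv_prefix_slash_iff (n.take k) n).mpr ⟨k, hk, hc, rfl⟩
    rcases hmemP with h | h | h
    · exact ⟨"backups/".toList, by simp [pvProtectedPrefixes], by
        rw [PySem.Chars.startswith_iff]; rw [h] at hpref; exact hpref⟩
    · exact ⟨"data/backups/".toList, by simp [pvProtectedPrefixes], by
        rw [PySem.Chars.startswith_iff]; rw [h] at hpref; exact hpref⟩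
    · exact ⟨".git/".toList, by simp [pvProtectedPrefixes], by
        rw [PySem.Chars.startswith_iff]; rw [h] at hpref; exact hpref⟩
  · rintro ⟨p, hp, hsw⟩
    rw [PySem.Chars.startswith_iff] at hsw
    -- each protected prefix is r ++ ['/'] with r ∈ pvProtectedPaths
    have : ∃ r ∈ pvProtectedPaths, p = r ++ ['/'] := by
      simp only [pvProtectedPrefixes, List.mem_cons, List.not_mem_nil, or_false] at hp
      rcases hp with rfl | rfl | rfl
      · exact ⟨"backups".toList, by simp [pvProtectedPaths], by decide⟩
      · exact ⟨"data/backups".toList, by simp [pvProtectedPaths], by decide⟩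
      · exact ⟨".git".toList, by simp [pvProtectedPaths], by decide⟩
    obtain ⟨r, hr, rfl⟩ := this
    obtain ⟨i, hilt, hc, htake⟩ := (pv_prefix_slash_iff r n).mp hsw
    refine ⟨((i : Int), n[i]), ?_, ?_⟩
    · rw [PySem.List.mem_enumerate_iff]
      exact ⟨i, hilt, by simp⟩
    · have hslice : PySem.Chars.slice n none (some (i : Int)) = n.take i := by
        simpa using PySem.List.slice_to n i
      simp only [hc, hslice, htake, beq_self_eq_true, Bool.true_and]
      simp [List.contains_eq_mem, hr]

-- ===== VERDICT (by name: the statement is the Claim_ definition above) =====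
theorem is_protected_path_py_spec : Claim_equal_is_protected_path_py := by
  intro path _
  unfold Spec_is_protected_path_py is_protected_path_py is_protected_path_py_alt
  set n := PySem.Chars.stripChars (PySem.Chars.replace path.toList ['\\'] ['/']) ['/'] with hn
  have hb : ((PySem.List.enumerate n).any
      (fun ic => ic.2 == '/' && pvProtectedPaths.contains (PySem.Chars.slice n none (some ic.1))))
      = (pvProtectedPrefixes.any (fun p => PySem.Chars.startswith n p)) :=
    Bool.eq_iff_iff.mpr (pv_scan_iff n)
  dsimp only
  rw [hb]
  generalize pvProtectedPaths.contains n = c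
  generalize (pvProtectedPrefixes.any (fun p => PySem.Chars.startswith n p)) = s
  cases c <;> cases s <;> simp
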